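-- pv_equiv track=rewrite | github.com/Riccardo11/scheduler | backup/scheduler_graph.py | create_flatten_domain
-- ===== SOURCE A (Python) =====
-- def create_flatten_domain(compatible_machines):
--     flatten_domain = []
--     for i, machine_id in enumerate(compatible_machines):
--         if i == 0:
--             flatten_domain.append(machine_id)
--
--         if i == len(compatible_machines)-1:
--             flatten_domain.append(machine_id)
--             return flatten_domain
--
--         if machine_id+1 != compatible_machines[i+1]:
--             flatten_domain.append(machine_id)
--             flatten_domain.append(compatible_machines[i+1])
--
--     # never used
--     return flatten_domain
-- ===== SOURCE B (Python) =====
-- def create_flatten_domain(compatible_machines):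
--     # Pass 1: build a run table of (first, last) values of each maximal consecutive run.
--     if not compatible_machines:
--         return []
--     runs = []
--     cur_start = compatible_machines[0]
--     prev = compatible_machines[0]
--     for x in compatible_machines[1:]:
--         if prev + 1 != x:
--             runs.append((cur_start, prev))
--             cur_start = x
--         prev = x
--     runs.append((cur_start, prev))
--     # Pass 2: emit both boundaries of every run.
--     out = []
--     for (s, e) in runs:
--         out.append(s)
--         out.append(e)
--     return out
-- ===== Notes on version B (the rewrite author's own statement) =====
-- stated objective: alternative
-- what changed: Replaces the single indexed enumerate loop with early return by a two-pass run table: one index-free pass folds the list into (first,last) pairs of maximal consecutive runs, a second pass emits both boundaries of each run.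
import Mathlib
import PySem

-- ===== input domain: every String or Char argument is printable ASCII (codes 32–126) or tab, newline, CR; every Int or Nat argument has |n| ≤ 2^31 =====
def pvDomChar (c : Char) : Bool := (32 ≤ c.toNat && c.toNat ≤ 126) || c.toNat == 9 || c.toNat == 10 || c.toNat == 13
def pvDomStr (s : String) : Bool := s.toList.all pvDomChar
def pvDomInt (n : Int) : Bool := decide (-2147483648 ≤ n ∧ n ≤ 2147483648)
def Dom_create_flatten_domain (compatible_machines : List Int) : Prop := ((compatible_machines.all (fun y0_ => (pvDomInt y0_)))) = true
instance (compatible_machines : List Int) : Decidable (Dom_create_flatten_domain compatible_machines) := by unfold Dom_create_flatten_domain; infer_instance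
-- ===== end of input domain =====

-- B replaces A's indexed enumerate loop (with early return and lookahead indexing) by a
-- two-pass run table: one index-free pass builds (first,last) pairs of maximal consecutive
-- runs, a second pass emits both boundaries of each run; same values on every input.

-- ===== PORT A =====
-- A's 'for i, machine_id in enumerate(compatible_machines)' loop, ported as recursion on the
-- remaining suffix with the running index i; cm[i+1] is ported with pyGet? (always in range
-- when read, since the branch requires i != len-1; getD 0 is never the taken value).
def aLoop (cm : List Int) (i : Nat) (rest : List Int) (acc : List Int) : List Int :=
  match rest with
  | [] => acc
  | mid :: rest' =>
    let acc1 := if i == 0 then acc ++ [mid] else acc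
    if i == cm.length - 1 then acc1 ++ [mid]
    else
      let nxt := (PySem.List.pyGet? cm ((i : Int) + 1)).getD 0
      let acc2 := if mid + 1 != nxt then acc1 ++ [mid, nxt] else acc1
      aLoop cm (i + 1) rest' acc2

def create_flatten_domain (compatible_machines : List Int) : List Int :=
  aLoop compatible_machines 0 compatible_machines []

-- ===== PORT B =====
-- pass 1 of Source B: fold over cm[1:] with state (runs, cur_start, prev)
def bRunsLoop (rest : List Int) (runs : List (Int × Int)) (curStart prev : Int) : List (Int × Int) :=
  match rest with
  | [] => runs ++ [(curStart, prev)]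
  | x :: rest' =>
    if prev + 1 != x then bRunsLoop rest' (runs ++ [(curStart, prev)]) x x
    else bRunsLoop rest' runs curStart x

def create_flatten_domain_alt (compatible_machines : List Int) : List Int :=
  match compatible_machines with
  | [] => []
  | x :: rest =>
    let runs := bRunsLoop rest [] x x
    -- pass 2 of Source B: for (s, e) in runs: out.append(s); out.append(e)
    runs.foldl (fun out p => out ++ [p.1, p.2]) []

-- ===== PRECONDITION & SPEC =====
def Spec_create_flatten_domain (compatible_machines : List Int) (out : List Int) : Prop := out = create_flatten_domain_alt compatible_machines
instance (compatible_machines : List Int) (out : List Int) : Decidable (Spec_create_flatten_domain compatible_machines out) := by unfold Spec_create_flatten_domain; infer_instance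

-- ===== CLAIM (what is proved, stated in full; the proofs are below) =====
def Claim_equal_create_flatten_domain : Prop := ∀ (compatible_machines : List Int), Dom_create_flatten_domain compatible_machines → Spec_create_flatten_domain compatible_machines (create_flatten_domain compatible_machines)

-- ===== LEMMAS AND PROOFS =====

-- Common characterisation: boundaries emitted after having last seen `prev`.
def bnd (prev : Int) : List Int → List Int
  | [] => [prev]
  | x :: rest => if prev + 1 ≠ x then prev :: x :: bnd x rest else bnd x rest

-- B side: pass 2 as recursion
lemma foldl_pairs (l : List (Int × Int)) (init : List Int) :
    l.foldl (fun out p => out ++ [p.1, p.2]) init = init ++ l.flatMap (fun p => [p.1, p.2]) := by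
  exact PySem.List.foldl_append_eq_flatMap _ _ _

lemma bRunsLoop_eq (rest : List Int) (runs : List (Int × Int)) (cs prev : Int) :
    (bRunsLoop rest runs cs prev).flatMap (fun p => [p.1, p.2])
      = runs.flatMap (fun p => [p.1, p.2]) ++ cs :: bnd prev rest := by
  induction rest generalizing runs cs prev with
  | nil => simp [bRunsLoop, bnd]
  | cons x r ih =>
    by_cases h : prev + 1 = x
    · simp [bRunsLoop, bnd, h, ih]
    · simp [bRunsLoop, bnd, h, ih]

lemma alt_eq (x : Int) (rest : List Int) :
    create_flatten_domain_alt (x :: rest) = x :: bnd x rest := by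
  show (bRunsLoop rest [] x x).foldl (fun out p => out ++ [p.1, p.2]) [] = x :: bnd x rest
  rw [foldl_pairs, bRunsLoop_eq]
  simp

-- A side
lemma aLoop_eq (cm : List Int) (i : Nat) (mid : Int) (rest' : List Int) (acc : List Int)
    (hi : 1 ≤ i) (hd : cm.drop i = mid :: rest') :
    aLoop cm i (mid :: rest') acc = acc ++ bnd mid rest' := by
  induction rest' generalizing i mid acc with
  | nil =>
    have hlt : i < cm.length := by
      by_contra h
      rw [List.drop_eq_nil_of_le (by omega)] at hd
      simp at hd
    have hlen' : cm.length - i = 1 := by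
      have := congrArg List.length hd
      simpa using this
    have hlen : cm.length = i + 1 := by omega
    simp [aLoop, bnd, hlen, Nat.ne_of_gt hi]
  | cons nxt r ih =>
    have hlt : i < cm.length := by
      by_contra h
      rw [List.drop_eq_nil_of_le (by omega)] at hd
      simp at hd
    have hlen' : cm.length - i = r.length + 2 := by
      have := congrArg List.length hd
      simpa using this
    have hlen : cm.length = i + r.length + 2 := by omega
    have hne : i ≠ cm.length - 1 := by omega
    have hget : cm[i+1]? = some nxt := by
      have : (cm.drop i)[1]? = some nxt := by rw [hd]; rfl
      rw [List.getElem?_drop] at this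
      simpa using this
    have hdrop : cm.drop (i+1) = nxt :: r := by
      have : (cm.drop i).drop 1 = cm.drop (i+1) := by
        rw [List.drop_drop]
      rw [← this, hd]
      rfl
    have hnxt : (PySem.List.pyGet? cm ((i : Int) + 1)).getD 0 = nxt := by
      have : ((i : Int) + 1) = ((i + 1 : Nat) : Int) := by push_cast; ring
      rw [this, PySem.List.pyGet?_natCast, hget]
      rfl
    have hi0 : (i == 0) = false := by simp; omega
    have hne' : (i == cm.length - 1) = false := by simp [hne]
    have step : aLoop cm i (mid :: nxt :: r) acc =
        aLoop cm (i + 1) (nxt :: r)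
          (if mid + 1 != nxt then acc ++ [mid, nxt] else acc) := by
      conv_lhs => rw [aLoop]
      simp only [hi0, hne', hnxt, Bool.false_eq_true, if_false]
    rw [step, ih (i + 1) nxt _ (by omega) hdrop]
    by_cases hb : mid + 1 = nxt
    · simp [bnd, hb]
    · simp [bnd, hb]

lemma a_eq (cm : List Int) : create_flatten_domain cm =
    (match cm with | [] => [] | x :: rest => x :: bnd x rest) := by
  match cm with
  | [] => rfl
  | [x] =>
    show aLoop [x] 0 [x] [] = [x, x]
    conv_lhs => rw [aLoop]
    simp
  | x :: nxt :: r =>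
    have hlen : ((0 : Nat) == (x :: nxt :: r).length - 1) = false := by simp
    have step : aLoop (x :: nxt :: r) 0 (x :: nxt :: r) [] =
        aLoop (x :: nxt :: r) 1 (nxt :: r)
          (if x + 1 != nxt then [x, x, nxt] else [x]) := by
      conv_lhs => rw [aLoop]
      simp
    show create_flatten_domain _ = _
    unfold create_flatten_domain
    rw [step, aLoop_eq (x :: nxt :: r) 1 nxt r _ (le_refl 1) rfl]
    by_cases hb : x + 1 = nxt
    · simp [bnd, hb]
    · simp [bnd, hb]

-- ===== VERDICT (by name: the statement is the Claim_ definition above) =====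
theorem create_flatten_domain_spec : Claim_equal_create_flatten_domain := by
  intro cm _
  unfold Spec_create_flatten_domain
  rw [a_eq]
  match cm with
  | [] => rfl
  | x :: rest => rw [alt_eq]
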